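-- pv_equiv track=rewrite | github.com/hbn1987/6Scan | analysis/APD.py | retrans
-- ===== SOURCE A (Python) =====
-- def retrans(lines):
--     colons=[]
--     for line in lines:
--         lout=list(line)
--         for i in range(4,35,5):
--             lout.insert(i,":")
--         lout="".join(lout)
--         colons.append(lout)
--     return colons
-- ===== SOURCE B (Python) =====
-- def retrans(lines):
--     return [":".join([line[i:i+4] for i in range(0, 28, 4)] + [line[28:]])
--             for line in lines]
-- ===== Notes on version B (the rewrite author's own statement) =====
-- stated objective: idiomatic
-- what changed: B slices each line into seven fixed 4-character groups plus an open-ended tail and joins them with ':', instead of A's mutating a char list with seven stepped list.insert calls (relying on insert's clamp-to-end behaviour for short lines).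
import Mathlib
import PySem

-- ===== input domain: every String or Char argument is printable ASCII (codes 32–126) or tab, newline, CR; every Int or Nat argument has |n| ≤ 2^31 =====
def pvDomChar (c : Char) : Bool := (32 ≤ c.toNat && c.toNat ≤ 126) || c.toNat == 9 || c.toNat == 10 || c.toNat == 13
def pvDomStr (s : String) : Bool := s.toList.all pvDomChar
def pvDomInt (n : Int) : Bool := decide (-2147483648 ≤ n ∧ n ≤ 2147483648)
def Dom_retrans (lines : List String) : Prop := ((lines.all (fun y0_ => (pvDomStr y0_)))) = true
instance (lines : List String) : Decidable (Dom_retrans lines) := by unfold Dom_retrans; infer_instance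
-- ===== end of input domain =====

-- B formats each line by slicing it into seven 4-char groups plus an open-ended tail and joining
-- with ":", instead of A's repeated list.insert of colons at stepped indices (objective: idiomatic).

-- ===== PORT A =====
def retrans (lines : List String) : List String :=
  lines.foldl (fun colons line =>
    colons ++ [String.ofList
      ((PySem.List.pyRange 4 35 5).foldl (fun lout i => PySem.List.insert lout i ':') line.toList)]) []

-- ===== PORT B =====
def retransFmt (line : String) : String :=
  PySem.Str.join ":"
    (((PySem.List.pyRange 0 28 4).map (fun i => PySem.Str.slice line (some i) (some (i + 4))))
      ++ [PySem.Str.slice line (some 28) none])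

def retrans_alt (lines : List String) : List String := lines.map retransFmt

-- ===== PRECONDITION & SPEC =====
def Spec_retrans (lines : List String) (out : List String) : Prop := out = retrans_alt lines
instance (lines : List String) (out : List String) : Decidable (Spec_retrans lines out) := by unfold Spec_retrans; infer_instance

-- ===== CLAIM (what is proved, stated in full; the proofs are below) =====
def Claim_equal_retrans : Prop := ∀ (lines : List String), Dom_retrans lines → Spec_retrans lines (retrans lines)

-- ===== LEMMAS AND PROOFS =====

-- Python list.insert clamps a nonnegative index to the length (appends past the end).
theorem ins_nat (xs : List Char) (i : ℕ) (v : Char) :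
    PySem.List.insert xs (i : ℤ) v = xs.take i ++ v :: xs.drop i := by
  by_cases h : i ≤ xs.length
  · exact PySem.List.insert_natCast xs i v h
  · rw [List.take_of_length_le (by omega), List.drop_eq_nil_of_le (by omega)]
    simp only [PySem.List.insert, PySem.List.sliceIndices]
    norm_num
    rw [min_eq_right (by exact_mod_cast Nat.le_of_lt (by omega))]
    simp [show ¬((i : ℤ) < 0) from by omega]

theorem ins_step (p t : List Char) (n : ℕ) (h : p.length ≤ n) :
    PySem.List.insert (p ++ t) (n : ℤ) ':'
      = p ++ (t.take (n - p.length) ++ ':' :: t.drop (n - p.length)) := by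
  rw [ins_nat, List.take_append, List.drop_append,
    List.take_of_length_le h, List.drop_eq_nil_of_le h]
  simp

theorem join_tail (gs : List (List Char)) (t : List Char) :
    PySem.Chars.join [':'] (gs ++ [t])
      = (gs.map (fun g => g ++ [':'])).flatten ++ t := by
  induction gs with
  | nil => simp [PySem.Chars.join_singleton]
  | cons g gs ih =>
    rcases gs with _ | ⟨g', gs'⟩
    · simpa using PySem.Chars.join_cons_cons [':'] g t []
    · simp only [List.cons_append] at ih ⊢
      rw [PySem.Chars.join_cons_cons, ih]
      simp

-- the prefix built after k colon insertions: k 4-char groups each followed by ':'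
def pfx (cs : List Char) (k : ℕ) : List Char :=
  ((List.range k).map (fun j => (cs.drop (4 * j)).take 4 ++ [':'])).flatten

theorem pfx_succ (cs : List Char) (k : ℕ) :
    pfx cs (k + 1) = pfx cs k ++ ((cs.drop (4 * k)).take 4 ++ [':']) := by
  simp [pfx, List.range_succ]

theorem pfx_len (cs : List Char) (k : ℕ) :
    (pfx cs k).length = min (4 * k) cs.length + k := by
  induction k with
  | zero => simp [pfx]
  | succ k ih =>
    rw [pfx_succ, List.length_append, ih]
    simp [List.length_take, List.length_drop]
    omega

theorem loopA (cs : List Char) (k : ℕ) :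
    (((List.range k).map (fun j : ℕ => ((4 + 5 * j : ℕ) : ℤ)))).foldl
        (fun lout i => PySem.List.insert lout i ':') cs
      = pfx cs k ++ cs.drop (4 * k) := by
  induction k with
  | zero => simp [pfx]
  | succ k ih =>
    simp only [List.range_succ, List.map_append, List.foldl_append, List.map_cons,
      List.map_nil, List.foldl_cons, List.foldl_nil]
    rw [ih, ins_step _ _ _ (by rw [pfx_len]; omega)]
    rw [pfx_succ]
    by_cases hlen : 4 * k ≤ cs.length
    · have hm : 4 + 5 * k - (pfx cs k).length = 4 := by rw [pfx_len]; omega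
      rw [hm, List.drop_drop, show 4 * k + 4 = 4 * (k + 1) by ring]
      simp
    · have ht : cs.drop (4 * k) = [] := List.drop_eq_nil_of_le (by omega)
      have ht' : cs.drop (4 * (k + 1)) = [] := List.drop_eq_nil_of_le (by omega)
      simp [ht, ht']

theorem slice4 (cs : List Char) (j : ℕ) :
    PySem.List.slice cs (some ((4 * j : ℕ) : ℤ)) (some (((4 * j : ℕ) : ℤ) + 4))
      = (cs.drop (4 * j)).take 4 := by
  rw [show ((4 * j : ℕ) : ℤ) + 4 = ((4 * j : ℕ) : ℤ) + ((4 : ℕ) : ℤ) by norm_num]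
  exact PySem.List.slice_natCast_add cs (4 * j) 4

theorem line_eq (cs : List Char) :
    (PySem.List.pyRange 4 35 5).foldl (fun lout i => PySem.List.insert lout i ':') cs
      = PySem.Chars.join [':']
          (((PySem.List.pyRange 0 28 4).map
              (fun i => PySem.List.slice cs (some i) (some (i + 4))))
            ++ [PySem.List.slice cs (some 28) none]) := by
  rw [show PySem.List.pyRange 4 35 5
      = (List.range 7).map (fun j : ℕ => ((4 + 5 * j : ℕ) : ℤ)) from by decide]
  rw [show PySem.List.pyRange 0 28 4
      = (List.range 7).map (fun j => ((4 * j : ℕ) : ℤ)) from by decide]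
  rw [loopA, List.map_map]
  rw [show PySem.List.slice cs (some 28) none = cs.drop 28 from
    PySem.List.slice_from_natCast cs 28]
  rw [join_tail, List.map_map]
  unfold pfx
  rw [show (4 * 7 : ℕ) = 28 by norm_num]
  congr 2
  apply List.map_congr_left
  intro j _
  simp only [Function.comp_apply]
  rw [slice4]

theorem foldl_append_map (f : String → String) :
    ∀ (ls : List String) (acc : List String),
      ls.foldl (fun a x => a ++ [f x]) acc = acc ++ ls.map f := by
  intro ls
  induction ls with
  | nil => simp
  | cons x xs ih => intro acc; rw [List.foldl_cons, ih]; simp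

theorem fmt_eq (line : String) :
    String.ofList
        ((PySem.List.pyRange 4 35 5).foldl (fun lout i => PySem.List.insert lout i ':') line.toList)
      = retransFmt line := by
  have hc : (":" : String).toList = [':'] := by decide
  rw [line_eq]
  simp only [retransFmt, PySem.Str.join, PySem.Str.slice, List.map_append, List.map_map, hc]
  refine congrArg String.ofList (congrArg (PySem.Chars.join [':']) ?_)
  simp [Function.comp, String.toList_ofList]

-- ===== VERDICT (by name: the statement is the Claim_ definition above) =====
theorem retrans_spec : Claim_equal_retrans := by
  intro lines _
  unfold Spec_retrans retrans retrans_alt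
  rw [foldl_append_map]
  simp only [List.nil_append]
  exact List.map_congr_left (fun line _ => fmt_eq line)
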